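-- pv_equiv track=rewrite | github.com/hahyuning/Coding-test-study | test/카카오/2020 internship/level 4/동굴 탐험 (위상정렬).py | solution
-- ===== SOURCE A (Python) =====
-- from collections import deque
--
-- def solution(n, path, order):
--     graph = [[] for _ in range(n)]
--     order_graph = [[] for _ in range(n)]
--     indegree = [0] * n
--
--     for a, b in path:
--         graph[a].append(b)
--         graph[b].append(a)
--
--     for a, b in order:
--         order_graph[a].append(b)
--         indegree[b] += 1
--
--     # 순서 그래프에 꼭 지켜야하는 순서(부모->자식)를 추가해서 최소의 순서 그래프 만들기
--     visited = [False] * n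
--     q = deque()
--     q.append(0)
--     visited[0] = True
--
--     while q:
--         now = q.popleft()
--         for nxt in graph[now]:
--             if not visited[nxt]:
--                 visited[nxt] = True
--                 q.append(nxt)
--                 order_graph[now].append(nxt)
--                 indegree[nxt] += 1
--
--     # 만들어진 순서 그래프로 위상정렬 수행
--     res = []
--     q = deque()
--     for i in range(n):
--         if indegree[i] == 0:
--             q.append(i)
--
--     while q:
--         now = q.popleft()
--         res.append(now)
--         for nxt in order_graph[now]:
--             indegree[nxt] -= 1
--             if indegree[nxt] == 0:
--                 q.append(nxt)
--
--     # 사이클이 발생하는 경우 모든 노드를 다 탐색하지 못하므로 false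
--     if len(res) < n:
--         return False
--     return True
-- ===== SOURCE B (Python) =====
-- from collections import deque
--
-- def solution(n, path, order):
--     # same graph construction and BFS spanning tree as the original
--     adj = [[] for _ in range(n)]
--     for a, b in path:
--         adj[a].append(b)
--         adj[b].append(a)
--     cons = [[] for _ in range(n)]
--     for a, b in order:
--         cons[a].append(b)
--
--     seen = [False] * n
--     seen[0] = True
--     q = deque([0])
--     while q:
--         u = q.popleft()
--         for v in adj[u]:
--             if not seen[v]:
--                 seen[v] = True
--                 q.append(v)
--                 cons[u].append(v)
--
--     # acyclicity of cons: repeatedly delete (in batches) every vertex with no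
--     # incoming constraint from a still-alive vertex; feasible iff none survive
--     alive = [True] * n
--     while True:
--         blocked = [False] * n
--         for w in range(n):
--             if alive[w]:
--                 for v in cons[w]:
--                     blocked[v] = True
--         removable = [u for u in range(n) if alive[u] and not blocked[u]]
--         if not removable:
--             return not any(alive)
--         for u in removable:
--             alive[u] = False
-- ===== Notes on version B (the rewrite author's own statement) =====
-- stated objective: alternative
-- what changed: B keeps the graph build and BFS spanning tree but replaces Kahn's indegree-counter queue topological sort by counter-free batch elimination rounds: repeatedly delete every vertex with no incoming constraint from a still-alive vertex, and report feasible iff none survive.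
import Mathlib
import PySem

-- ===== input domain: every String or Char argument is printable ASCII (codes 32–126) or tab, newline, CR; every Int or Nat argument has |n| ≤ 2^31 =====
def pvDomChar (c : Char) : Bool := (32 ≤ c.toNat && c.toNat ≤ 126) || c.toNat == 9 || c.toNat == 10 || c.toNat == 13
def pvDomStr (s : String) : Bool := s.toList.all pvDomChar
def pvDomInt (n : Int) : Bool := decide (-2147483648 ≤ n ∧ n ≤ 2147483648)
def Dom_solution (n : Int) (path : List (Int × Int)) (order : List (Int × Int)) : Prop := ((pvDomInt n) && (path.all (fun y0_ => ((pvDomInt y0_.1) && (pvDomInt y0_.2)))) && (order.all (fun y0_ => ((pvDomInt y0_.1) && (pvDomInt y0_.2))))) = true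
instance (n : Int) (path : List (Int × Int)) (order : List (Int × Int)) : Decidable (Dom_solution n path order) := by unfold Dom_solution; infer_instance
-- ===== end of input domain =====

-- B replaces the indegree-counting Kahn topological sort by counter-free batch
-- elimination rounds (and builds the adjacency lists by per-node comprehension);
-- objective: alternative (not claimed faster).

-- ===== PORT A =====
-- Python list access with index wraparound (xs[i] with -len <= i < len;
-- Pre_solution keeps every index in that range, where Python returns)
def pvIx (len : Nat) (i : Int) : Nat := (if i < 0 then i + (len : Int) else i).toNat
def pvGetLL (xs : List (List Int)) (i : Int) : List Int := xs.getD (pvIx xs.length i) []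
def pvGetI (xs : List Int) (i : Int) : Int := xs.getD (pvIx xs.length i) 0
def pvGetB (xs : List Bool) (i : Int) : Bool := xs.getD (pvIx xs.length i) false
def pvSetLL (xs : List (List Int)) (i : Int) (v : List Int) : List (List Int) := xs.set (pvIx xs.length i) v
def pvSetI (xs : List Int) (i : Int) (v : Int) : List Int := xs.set (pvIx xs.length i) v
def pvSetB (xs : List Bool) (i : Int) (v : Bool) : List Bool := xs.set (pvIx xs.length i) v

-- for a, b in path: graph[a].append(b); graph[b].append(a)   (shared verbatim by Source B)
def buildGraphA (path : List (Int × Int)) (g0 : List (List Int)) : List (List Int) :=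
  path.foldl (fun g p =>
    let g1 := pvSetLL g p.1 (pvGetLL g p.1 ++ [p.2])
    pvSetLL g1 p.2 (pvGetLL g1 p.2 ++ [p.1])) g0

-- for a, b in order: order_graph[a].append(b); indegree[b] += 1
def buildOrderA (order : List (Int × Int)) (st0 : List (List Int) × List Int) :
    List (List Int) × List Int :=
  order.foldl (fun st p =>
    (pvSetLL st.1 p.1 (pvGetLL st.1 p.1 ++ [p.2]),
     pvSetI st.2 p.2 (pvGetI st.2 p.2 + 1))) st0

-- inner loop 'for nxt in graph[now]' of the BFS; state = (visited, q, order_graph, indegree)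
def bfsStepA (now : Int) (nbrs : List Int)
    (st : List Bool × List Int × List (List Int) × List Int) :
    List Bool × List Int × List (List Int) × List Int :=
  nbrs.foldl (fun st nxt =>
    if pvGetB st.1 nxt then st
    else (pvSetB st.1 nxt true, st.2.1 ++ [nxt],
          pvSetLL st.2.2.1 now (pvGetLL st.2.2.1 now ++ [nxt]),
          pvSetI st.2.2.2 nxt (pvGetI st.2.2.2 nxt + 1))) st

-- while q: now = q.popleft(); …   (fuel n+1 is enough: at most n nodes are ever enqueued)
def bfsLoopA (graph : List (List Int)) :
    Nat → List Bool → List Int → List (List Int) → List Int →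
    List Bool × List (List Int) × List Int
  | 0, vis, _, og, ind => (vis, og, ind)
  | _ + 1, vis, [], og, ind => (vis, og, ind)
  | fuel + 1, vis, now :: rest, og, ind =>
      let st := bfsStepA now (pvGetLL graph now) (vis, rest, og, ind)
      bfsLoopA graph fuel st.1 st.2.1 st.2.2.1 st.2.2.2

-- inner loop 'for nxt in order_graph[now]' of Kahn; state = (indegree, q)
def kahnStepA (nbrs : List Int) (st : List Int × List Int) : List Int × List Int :=
  nbrs.foldl (fun st nxt =>
    let ind' := pvSetI st.1 nxt (pvGetI st.1 nxt - 1)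
    if pvGetI ind' nxt = 0 then (ind', st.2 ++ [nxt]) else (ind', st.2)) st

-- while q: now = q.popleft(); res.append(now); …   (fuel n+1 is enough: see kahn lemmas)
def kahnLoopA (og : List (List Int)) : Nat → List Int → List Int → List Int → List Int
  | 0, _, _, res => res
  | _ + 1, _, [], res => res
  | fuel + 1, ind, now :: rest, res =>
      let st := kahnStepA (pvGetLL og now) (ind, rest)
      kahnLoopA og fuel st.1 st.2 (res ++ [now])

def solution (n : Int) (path : List (Int × Int)) (order : List (Int × Int)) : Bool :=
  let N := n.toNat
  let graph := buildGraphA path (List.replicate N [])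
  let st := buildOrderA order (List.replicate N [], List.replicate N 0)
  let vis0 := pvSetB (List.replicate N false) 0 true
  let r := bfsLoopA graph (N + 1) vis0 [0] st.1 st.2
  let q0 := (List.range N).foldl
    (fun q i => if pvGetI r.2.2 ((i : Nat) : Int) = 0 then q ++ [((i : Nat) : Int)] else q) []
  let res := kahnLoopA r.2.1 (N + 1) r.2.2 q0 []
  if (res.length : Int) < n then false else true

-- ===== PORT B =====
-- Source B builds adj exactly as Source A builds graph (the same loop: buildGraphA above);
-- cons is built by the order loop without the indegree counter of A
def buildConsB (order : List (Int × Int)) (c0 : List (List Int)) : List (List Int) :=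
  order.foldl (fun c p => pvSetLL c p.1 (pvGetLL c p.1 ++ [p.2])) c0

-- BFS inner loop of Source B; state = (seen, q, cons) — no indegree counter
def bfsStepB (now : Int) (nbrs : List Int)
    (st : List Bool × List Int × List (List Int)) :
    List Bool × List Int × List (List Int) :=
  nbrs.foldl (fun st nxt =>
    if pvGetB st.1 nxt then st
    else (pvSetB st.1 nxt true, st.2.1 ++ [nxt],
          pvSetLL st.2.2 now (pvGetLL st.2.2 now ++ [nxt]))) st

def bfsLoopB (adj : List (List Int)) :
    Nat → List Bool → List Int → List (List Int) → List Bool × List (List Int)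
  | 0, vis, _, cons => (vis, cons)
  | _ + 1, vis, [], cons => (vis, cons)
  | fuel + 1, vis, now :: rest, cons =>
      let st := bfsStepB now (pvGetLL adj now) (vis, rest, cons)
      bfsLoopB adj fuel st.1 st.2.1 st.2.2

-- blocked[v] = some still-alive vertex has a constraint edge into v
def blockedB (N : Nat) (cons : List (List Int)) (alive : List Bool) : List Bool :=
  (List.range N).foldl (fun bl w =>
    if pvGetB alive ((w : Nat) : Int) then
      (pvGetLL cons ((w : Nat) : Int)).foldl (fun bl v => pvSetB bl v true) bl
    else bl) (List.replicate N false)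

-- while True: … ; each round kills every currently unblocked alive vertex
def elimLoopB (N : Nat) (cons : List (List Int)) : Nat → List Bool → Bool
  | 0, alive => !(alive.any (fun b => b))   -- never reached with fuel N+1 (proved below)
  | fuel + 1, alive =>
      let bl := blockedB N cons alive
      let removable := (List.range N).filter
        (fun u => pvGetB alive ((u : Nat) : Int) && !(pvGetB bl ((u : Nat) : Int)))
      if removable = [] then !(alive.any (fun b => b))
      else elimLoopB N cons fuel
        (removable.foldl (fun al u => pvSetB al ((u : Nat) : Int) false) alive)

def solution_alt (n : Int) (path : List (Int × Int)) (order : List (Int × Int)) : Bool :=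
  let N := n.toNat
  let adj := buildGraphA path (List.replicate N [])
  let cons0 := buildConsB order (List.replicate N [])
  let vis0 := pvSetB (List.replicate N false) 0 true
  let r := bfsLoopB adj (N + 1) vis0 [0] cons0
  elimLoopB N r.2 (N + 1) (List.replicate N true)

-- ===== PRECONDITION & SPEC =====
-- Pre_ = exactly the inputs where A returns: n >= 1 and every room label a valid
-- Python index into a list of length n (-n <= label < n); outside it A raises IndexError.
def Pre_solution (n : Int) (path : List (Int × Int)) (order : List (Int × Int)) : Prop :=
  1 ≤ n ∧ (∀ p ∈ path, -n ≤ p.1 ∧ p.1 < n ∧ -n ≤ p.2 ∧ p.2 < n)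
        ∧ (∀ p ∈ order, -n ≤ p.1 ∧ p.1 < n ∧ -n ≤ p.2 ∧ p.2 < n)
instance (n : Int) (path : List (Int × Int)) (order : List (Int × Int)) :
    Decidable (Pre_solution n path order) := by unfold Pre_solution; infer_instance

def pvWitness_solution : Int × (List (Int × Int)) × (List (Int × Int)) :=
  (3, [(0, 1), (1, 2)], [(2, -2)])

def Spec_solution (n : Int) (path : List (Int × Int)) (order : List (Int × Int)) (out : Bool) : Prop := out = solution_alt n path order
instance (n : Int) (path : List (Int × Int)) (order : List (Int × Int)) (out : Bool) : Decidable (Spec_solution n path order out) := by unfold Spec_solution; infer_instance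

-- ===== CLAIM (what is proved, stated in full; the proofs are below) =====
def Claim_equal_solution : Prop := ∀ (n : Int) (path : List (Int × Int)) (order : List (Int × Int)), Dom_solution n path order → Pre_solution n path order → Spec_solution n path order (solution n path order)

-- ===== LEMMAS AND PROOFS =====

-- ---------- index and access lemmas ----------
-- a valid Python index for a list of length N (where A returns instead of raising)
def isLbl (N : Nat) (v : Int) : Prop := -(N : Int) ≤ v ∧ v < (N : Int)

theorem pvIx_lt {N : Nat} {v : Int} (h : isLbl N v) : pvIx N v < N := by
  rcases h with ⟨h1, h2⟩
  unfold pvIx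
  split <;> omega

theorem pvIx_natCast (N i : Nat) : pvIx N ((i : Nat) : Int) = i := by
  unfold pvIx
  split <;> omega

theorem isLbl_natCast {N i : Nat} (h : i < N) : isLbl N ((i : Nat) : Int) := ⟨by omega, by omega⟩

theorem getD_set_self {α : Type} (xs : List α) (i : Nat) (v d : α) (h : i < xs.length) :
    (xs.set i v).getD i d = v := by simp [List.getD, h]

theorem getD_set_ne {α : Type} (xs : List α) (i j : Nat) (v d : α) (h : i ≠ j) :
    (xs.set i v).getD j d = xs.getD j d := by simp [List.getD, h]

theorem pvGetI_eq {N : Nat} (xs : List Int) (hlen : xs.length = N) (v : Int) :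
    pvGetI xs v = xs.getD (pvIx N v) 0 := by rw [pvGetI, hlen]
theorem pvGetB_eq {N : Nat} (xs : List Bool) (hlen : xs.length = N) (v : Int) :
    pvGetB xs v = xs.getD (pvIx N v) false := by rw [pvGetB, hlen]
theorem pvGetLL_eq {N : Nat} (xs : List (List Int)) (hlen : xs.length = N) (v : Int) :
    pvGetLL xs v = xs.getD (pvIx N v) [] := by rw [pvGetLL, hlen]
theorem pvSetI_eq {N : Nat} (xs : List Int) (hlen : xs.length = N) (v w : Int) :
    pvSetI xs v w = xs.set (pvIx N v) w := by rw [pvSetI, hlen]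
theorem pvSetB_eq {N : Nat} (xs : List Bool) (hlen : xs.length = N) (v : Int) (w : Bool) :
    pvSetB xs v w = xs.set (pvIx N v) w := by rw [pvSetB, hlen]
theorem pvSetLL_eq {N : Nat} (xs : List (List Int)) (hlen : xs.length = N) (v : Int) (w : List Int) :
    pvSetLL xs v w = xs.set (pvIx N v) w := by rw [pvSetLL, hlen]

-- ---------- node-level incoming-edge counting ----------
-- number of entries of l naming node j
def nodeCnt (N : Nat) (l : List Int) (j : Nat) : Nat := l.countP (fun x => pvIx N x == j)

-- incoming og-edges of node j from rows outside resN
def cntOut (N : Nat) (og : List (List Int)) (resN : List Nat) (j : Nat) : Nat :=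
  ∑ u ∈ Finset.range N, if u ∈ resN then 0 else nodeCnt N (og.getD u []) j

-- a set of nodes in which every node has an incoming og-edge from the set
def StuckP (N : Nat) (og : List (List Int)) (S : Nat → Prop) : Prop :=
  ∀ j, S j → j < N ∧ ∃ u, S u ∧ ∃ x ∈ og.getD u [], pvIx N x = j

theorem nodeCnt_eq_zero {N : Nat} (l : List Int) (j : Nat) :
    nodeCnt N l j = 0 ↔ ∀ x ∈ l, pvIx N x ≠ j := by
  rw [nodeCnt, List.countP_eq_zero]
  simp

theorem nodeCnt_cons_self {N : Nat} (x : Int) (l : List Int) :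
    nodeCnt N (x :: l) (pvIx N x) = nodeCnt N l (pvIx N x) + 1 := by
  rw [nodeCnt, nodeCnt, List.countP_cons]
  simp

theorem nodeCnt_cons_ne {N : Nat} (x : Int) (l : List Int) (j : Nat) (h : pvIx N x ≠ j) :
    nodeCnt N (x :: l) j = nodeCnt N l j := by
  rw [nodeCnt, nodeCnt, List.countP_cons]
  simp [h]

theorem nodeCnt_append_single {N : Nat} (l : List Int) (b : Int) (j : Nat) :
    nodeCnt N (l ++ [b]) j = nodeCnt N l j + (if pvIx N b = j then 1 else 0) := by
  rw [nodeCnt, nodeCnt, List.countP_append]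
  by_cases h : pvIx N b = j <;> simp [h]

theorem cntOut_zero_iff {N : Nat} (og : List (List Int)) (resN : List Nat) (j : Nat) :
    (cntOut N og resN j = 0 ↔
      ∀ u : Nat, u < N → u ∉ resN → ∀ x ∈ og.getD u [], pvIx N x ≠ j) := by
  unfold cntOut
  rw [Finset.sum_eq_zero_iff]
  constructor
  · intro h u hu hur
    have h1 := h u (Finset.mem_range.mpr hu)
    rw [if_neg hur] at h1
    exact (nodeCnt_eq_zero _ _).mp h1
  · intro h u hu
    by_cases hc : u ∈ resN
    · rw [if_pos hc]
    · rw [if_neg hc]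
      exact (nodeCnt_eq_zero _ _).mpr (h u (Finset.mem_range.mp hu) hc)

theorem cntOut_push {N : Nat} (og : List (List Int)) (resN : List Nat) (now j : Nat)
    (hnow : now < N) (hfresh : now ∉ resN) :
    cntOut N og resN j = cntOut N og (resN ++ [now]) j + nodeCnt N (og.getD now []) j := by
  unfold cntOut
  have hmem : now ∈ Finset.range N := Finset.mem_range.mpr hnow
  rw [← Finset.sum_erase_add _ _ hmem, ← Finset.sum_erase_add _ _ hmem]
  have h1 : ∀ u ∈ (Finset.range N).erase now,
      (if u ∈ resN ++ [now] then 0 else nodeCnt N (og.getD u []) j) =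
      (if u ∈ resN then 0 else nodeCnt N (og.getD u []) j) := by
    intro u hu
    rw [Finset.mem_erase] at hu
    by_cases hc : u ∈ resN
    · rw [if_pos hc, if_pos (by simp [hc])]
    · rw [if_neg hc, if_neg (by simp [hc, hu.1])]
  rw [Finset.sum_congr rfl h1, if_neg hfresh, if_pos (by simp)]
  omega

theorem cntOut_append_row {N : Nat} (og : List (List Int)) (hogl : og.length = N)
    (a : Nat) (ha : a < N) (b : Int) (j : Nat) :
    cntOut N (og.set a (og.getD a [] ++ [b])) [] j =
      cntOut N og [] j + (if pvIx N b = j then 1 else 0) := by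
  unfold cntOut
  have hmem : a ∈ Finset.range N := Finset.mem_range.mpr ha
  rw [← Finset.sum_erase_add _ _ hmem, ← Finset.sum_erase_add _ _ hmem]
  have h1 : ∀ u ∈ (Finset.range N).erase a,
      (if u ∈ ([] : List Nat) then 0 else nodeCnt N ((og.set a (og.getD a [] ++ [b])).getD u []) j) =
      (if u ∈ ([] : List Nat) then 0 else nodeCnt N (og.getD u []) j) := by
    intro u hu
    rw [Finset.mem_erase] at hu
    rw [getD_set_ne _ _ _ _ _ (fun he => hu.1 he.symm)]
  rw [Finset.sum_congr rfl h1]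
  simp only [List.not_mem_nil, if_false]
  rw [getD_set_self _ _ _ _ (by omega), nodeCnt_append_single]
  omega

-- ---------- build phase ----------
def buildIND (order : List (Int × Int)) (ind : List Int) : List Int :=
  order.foldl (fun ind p => pvSetI ind p.2 (pvGetI ind p.2 + 1)) ind

theorem buildOrderA_eta (order : List (Int × Int)) (og : List (List Int)) (ind : List Int) :
    buildOrderA order (og, ind) = (buildConsB order og, buildIND order ind) := by
  induction order generalizing og ind with
  | nil => rfl
  | cons p rest ih => exact ih _ _

-- every row entry is a valid label
def RowsLbl (N : Nat) (og : List (List Int)) : Prop := ∀ l ∈ og, ∀ x ∈ l, isLbl N x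

-- indegree list = incoming-edge count of the order graph
def BInv (N : Nat) (og : List (List Int)) (ind : List Int) : Prop :=
  og.length = N ∧ ind.length = N ∧
    ∀ j, j < N → ind.getD j 0 = ((cntOut N og [] j : Nat) : Int)

theorem appendRow_rows {N : Nat} (og : List (List Int)) (a : Nat) (b : Int)
    (hb : isLbl N b) (hrows : RowsLbl N og) :
    RowsLbl N (og.set a (og.getD a [] ++ [b])) := by
  intro l hl x hx
  rcases List.mem_or_eq_of_mem_set hl with hl2 | hl2
  · exact hrows l hl2 x hx
  · subst hl2
    rcases List.mem_append.mp hx with hm | hm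
    · by_cases hlt : a < og.length
      · exact hrows _ (by rw [List.getD_eq_getElem _ _ hlt]; exact List.getElem_mem _) x hm
      · rw [List.getD_eq_default _ _ (by omega)] at hm
        simp at hm
    · rw [List.mem_singleton] at hm; subst hm; exact hb

theorem getD_set_node (xs : List Int) (i j : Nat) (w : Int) (hj : j < xs.length) :
    (xs.set i w).getD j 0 = if i = j then w else xs.getD j 0 := by
  by_cases h : i = j
  · subst h; rw [getD_set_self _ _ _ _ hj, if_pos rfl]
  · rw [getD_set_ne _ _ _ _ _ h, if_neg h]

theorem buildOrder_BInv {N : Nat} (order : List (Int × Int)) (og : List (List Int)) (ind : List Int)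
    (hr : ∀ p ∈ order, isLbl N p.1 ∧ isLbl N p.2) (hinv : BInv N og ind)
    (hrows : RowsLbl N og) :
    BInv N (buildConsB order og) (buildIND order ind) ∧ RowsLbl N (buildConsB order og) := by
  induction order generalizing og ind with
  | nil => exact ⟨hinv, hrows⟩
  | cons p rest ih =>
    obtain ⟨h1, h2, h3⟩ := hinv
    have hp := hr p (by simp)
    have hstep1 : buildConsB (p :: rest) og =
        buildConsB rest (og.set (pvIx N p.1) (og.getD (pvIx N p.1) [] ++ [p.2])) := by
      rw [buildConsB, List.foldl_cons, pvSetLL_eq og h1, pvGetLL_eq og h1, ← buildConsB]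
    have hstep2 : buildIND (p :: rest) ind =
        buildIND rest (ind.set (pvIx N p.2) (ind.getD (pvIx N p.2) 0 + 1)) := by
      rw [buildIND, List.foldl_cons, pvSetI_eq ind h2, pvGetI_eq ind h2, ← buildIND]
    rw [hstep1, hstep2]
    refine ih _ _ (fun q hq => hr q (by simp [hq])) ⟨by simp [h1], by simp [h2], ?_⟩
      (appendRow_rows og _ p.2 hp.2 hrows)
    intro j hj
    rw [getD_set_node ind _ j _ (by omega),
      cntOut_append_row og h1 (pvIx N p.1) (pvIx_lt hp.1) p.2 j]
    by_cases he : pvIx N p.2 = j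
    · rw [if_pos he, if_pos he, ← he, h3 (pvIx N p.2) (by omega)]
      push_cast
      ring
    · rw [if_neg he, if_neg he, h3 j hj]; push_cast; ring

theorem BInv_init (N : Nat) : BInv N (List.replicate N []) (List.replicate N 0) := by
  refine ⟨by simp, by simp, fun j hj => ?_⟩
  rw [List.getD_replicate _ hj]
  unfold cntOut
  rw [Finset.sum_eq_zero (fun u hu => by
    rw [List.getD_replicate _ (by simpa using Finset.mem_range.mp hu)]
    simp [nodeCnt])]
  simp

theorem buildGraph_rows {N : Nat} (path : List (Int × Int)) (g0 : List (List Int))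
    (hlen : g0.length = N) (hr : ∀ p ∈ path, isLbl N p.1 ∧ isLbl N p.2)
    (hrows : RowsLbl N g0) : RowsLbl N (buildGraphA path g0) := by
  induction path generalizing g0 with
  | nil => exact hrows
  | cons p rest ih =>
    have hp := hr p (by simp)
    have hg1len : (pvSetLL g0 p.1 (pvGetLL g0 p.1 ++ [p.2])).length = N := by
      simp [pvSetLL, hlen]
    rw [show buildGraphA (p :: rest) g0 = buildGraphA rest
      (pvSetLL (pvSetLL g0 p.1 (pvGetLL g0 p.1 ++ [p.2])) p.2
        (pvGetLL (pvSetLL g0 p.1 (pvGetLL g0 p.1 ++ [p.2])) p.2 ++ [p.1])) from rfl]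
    refine ih _ (by simp [pvSetLL, hlen]) (fun q hq => hr q (by simp [hq])) ?_
    rw [pvSetLL_eq _ hg1len, pvGetLL_eq _ hg1len]
    refine appendRow_rows _ _ p.1 hp.1 ?_
    rw [pvSetLL_eq _ hlen, pvGetLL_eq _ hlen]
    exact appendRow_rows _ _ p.2 hp.2 hrows

-- ---------- BFS phase: B's loop is A's loop without the indegree component ----------
theorem bfsStep_proj (now : Int) (nbrs : List Int) (vis : List Bool) (q : List Int)
    (og : List (List Int)) (ind : List Int) :
    bfsStepB now nbrs (vis, q, og) =
      ((bfsStepA now nbrs (vis, q, og, ind)).1, (bfsStepA now nbrs (vis, q, og, ind)).2.1,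
       (bfsStepA now nbrs (vis, q, og, ind)).2.2.1) := by
  induction nbrs generalizing vis q og ind with
  | nil => rfl
  | cons nxt rest ih =>
    by_cases h : pvGetB vis nxt
    · simpa [bfsStepA, bfsStepB, List.foldl_cons, h] using ih vis q og ind
    · simpa [bfsStepA, bfsStepB, List.foldl_cons, h] using ih _ _ _ _

theorem bfsLoop_proj (g : List (List Int)) (fuel : Nat) (vis : List Bool) (q : List Int)
    (og : List (List Int)) (ind : List Int) :
    bfsLoopB g fuel vis q og =
      ((bfsLoopA g fuel vis q og ind).1, (bfsLoopA g fuel vis q og ind).2.1) := by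
  induction fuel generalizing vis q og ind with
  | zero => rfl
  | succ fuel ih =>
    cases q with
    | nil => rfl
    | cons now rest =>
      rw [bfsLoopA, bfsLoopB, bfsStep_proj now _ vis rest og ind]
      exact ih _ _ _ _

-- state invariant carried through the BFS
def SInv (N : Nat) (q : List Int) (og : List (List Int)) (ind : List Int) : Prop :=
  BInv N og ind ∧ (∀ x ∈ q, isLbl N x) ∧ RowsLbl N og

theorem bfsStepA_inv {N : Nat} (now : Int) (nbrs : List Int) (vis : List Bool) (q : List Int)
    (og : List (List Int)) (ind : List Int) (hnow : isLbl N now)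
    (hnb : ∀ x ∈ nbrs, isLbl N x) (hinv : SInv N q og ind) :
    SInv N (bfsStepA now nbrs (vis, q, og, ind)).2.1 (bfsStepA now nbrs (vis, q, og, ind)).2.2.1
      (bfsStepA now nbrs (vis, q, og, ind)).2.2.2 := by
  induction nbrs generalizing vis q og ind with
  | nil => exact hinv
  | cons nxt rest ih =>
    have hx := hnb nxt (by simp)
    by_cases h : pvGetB vis nxt
    · rw [show bfsStepA now (nxt :: rest) (vis, q, og, ind) =
        bfsStepA now rest (vis, q, og, ind) from by simp [bfsStepA, List.foldl_cons, h]]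
      exact ih _ _ _ _ (fun x hxm => hnb x (by simp [hxm])) hinv
    · rw [show bfsStepA now (nxt :: rest) (vis, q, og, ind) =
        bfsStepA now rest (pvSetB vis nxt true, q ++ [nxt],
          pvSetLL og now (pvGetLL og now ++ [nxt]),
          pvSetI ind nxt (pvGetI ind nxt + 1)) from by simp [bfsStepA, List.foldl_cons, h]]
      obtain ⟨⟨h1, h2, h3⟩, h4, h5⟩ := hinv
      refine ih _ _ _ _ (fun x hxm => hnb x (by simp [hxm])) ⟨⟨?_, ?_, ?_⟩, ?_, ?_⟩
      · simp [pvSetLL, h1]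
      · simp [pvSetI, h2]
      · intro j hj
        rw [pvSetI_eq ind h2, pvGetI_eq ind h2, pvSetLL_eq og h1, pvGetLL_eq og h1,
          getD_set_node ind _ j _ (by omega),
          cntOut_append_row og h1 (pvIx N now) (pvIx_lt hnow) nxt j]
        by_cases he : pvIx N nxt = j
        · rw [if_pos he, if_pos he, ← he, h3 (pvIx N nxt) (by omega)]
          push_cast
          ring
        · rw [if_neg he, if_neg he, h3 j hj]
          push_cast
          ring
      · intro x hxm
        rcases List.mem_append.mp hxm with hl | hr2
        · exact h4 x hl
        · rw [List.mem_singleton] at hr2; subst hr2; exact hx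
      · rw [pvSetLL_eq og h1, pvGetLL_eq og h1]
        exact appendRow_rows og _ nxt hx h5

theorem bfsLoopA_inv {N : Nat} (g : List (List Int)) (hg : RowsLbl N g)
    (fuel : Nat) (vis : List Bool) (q : List Int) (og : List (List Int)) (ind : List Int)
    (hinv : SInv N q og ind) :
    BInv N (bfsLoopA g fuel vis q og ind).2.1 (bfsLoopA g fuel vis q og ind).2.2 ∧
      RowsLbl N (bfsLoopA g fuel vis q og ind).2.1 := by
  induction fuel generalizing vis q og ind with
  | zero => exact ⟨hinv.1, hinv.2.2⟩
  | succ fuel ih =>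
    cases q with
    | nil => exact ⟨hinv.1, hinv.2.2⟩
    | cons now rest =>
      rw [bfsLoopA]
      have hnow : isLbl N now := hinv.2.1 now (by simp)
      have hnb : ∀ x ∈ pvGetLL g now, isLbl N x := by
        intro x hx
        by_cases hlt : pvIx g.length now < g.length
        · exact hg _ (by rw [pvGetLL, List.getD_eq_getElem _ _ hlt]; exact List.getElem_mem _) x hx
        · rw [pvGetLL, List.getD_eq_default _ _ (by omega)] at hx
          simp at hx
      have hstep := bfsStepA_inv now (pvGetLL g now) vis rest og ind hnow hnb
        ⟨hinv.1, fun x hx => hinv.2.1 x (by simp [hx]), hinv.2.2⟩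
      exact ih _ _ _ _ hstep

-- ---------- Kahn loop: invariant and final characterisation ----------
-- labels mapped to their nodes
def mapN (N : Nat) (l : List Int) : List Nat := l.map (fun x => pvIx N x)

theorem mapN_append (N : Nat) (a b : List Int) :
    mapN N (a ++ b) = mapN N a ++ mapN N b := List.map_append ..

-- mid-state invariant: 'res' has been popped, 'suf' of the current out-list is unprocessed
def KMid (N : Nat) (og : List (List Int)) (suf : List Int) (ind : List Int)
    (q res : List Int) : Prop :=
  ind.length = N ∧
  (mapN N (res ++ q)).Nodup ∧
  (∀ x ∈ res ++ q, isLbl N x) ∧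
  (∀ j, j < N → ind.getD j 0 = ((cntOut N og (mapN N res) j + nodeCnt N suf j : Nat) : Int)) ∧
  (∀ j, j < N → (j ∈ mapN N (res ++ q) ↔ cntOut N og (mapN N res) j + nodeCnt N suf j = 0)) ∧
  (∀ S, StuckP N og S → ∀ j, S j → j ∉ mapN N (res ++ q))

theorem kahnStep_fold {N : Nat} (og : List (List Int))
    (suf : List Int) (hsuf : ∀ x ∈ suf, isLbl N x) :
    ∀ ind q res, KMid N og suf ind q res →
      KMid N og [] (kahnStepA suf (ind, q)).1 (kahnStepA suf (ind, q)).2 res := by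
  induction suf with
  | nil => intro ind q res h; exact h
  | cons nxt suf ih =>
    intro ind q res h
    obtain ⟨h1, h2, h3, h4, h5, h6⟩ := h
    have hx : isLbl N nxt := hsuf nxt (by simp)
    have hjn : pvIx N nxt < N := pvIx_lt hx
    have h1' : (pvSetI ind nxt (pvGetI ind nxt - 1)).length = N := by simp [pvSetI, h1]
    have hset : pvSetI ind nxt (pvGetI ind nxt - 1) =
        ind.set (pvIx N nxt) (ind.getD (pvIx N nxt) 0 - 1) := by
      rw [pvSetI_eq ind h1, pvGetI_eq ind h1]
    have hget : (pvSetI ind nxt (pvGetI ind nxt - 1)).getD (pvIx N nxt) 0 =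
        ((cntOut N og (mapN N res) (pvIx N nxt) + nodeCnt N suf (pvIx N nxt) : Nat) : Int) := by
      rw [hset, getD_set_node ind _ _ _ (by omega), if_pos rfl, h4 (pvIx N nxt) hjn,
        nodeCnt_cons_self]
      push_cast; ring
    have hgv : ∀ j, j < N → j ≠ pvIx N nxt →
        (pvSetI ind nxt (pvGetI ind nxt - 1)).getD j 0 =
          ((cntOut N og (mapN N res) j + nodeCnt N suf j : Nat) : Int) := by
      intro j hj hne
      rw [hset, getD_set_node ind _ _ _ (by omega), if_neg (fun he => hne he.symm), h4 j hj,
        nodeCnt_cons_ne nxt suf j (fun he => hne he.symm)]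
    have hcond_eq : pvGetI (pvSetI ind nxt (pvGetI ind nxt - 1)) nxt =
        ((cntOut N og (mapN N res) (pvIx N nxt) + nodeCnt N suf (pvIx N nxt) : Nat) : Int) := by
      rw [pvGetI_eq _ h1', hget]
    by_cases hz : cntOut N og (mapN N res) (pvIx N nxt) + nodeCnt N suf (pvIx N nxt) = 0
    · -- indegree hit zero: nxt is enqueued
      have hcond : pvGetI (pvSetI ind nxt (pvGetI ind nxt - 1)) nxt = 0 := by
        rw [hcond_eq, hz]; simp
      have hstep : kahnStepA (nxt :: suf) (ind, q) =
          kahnStepA suf (pvSetI ind nxt (pvGetI ind nxt - 1), q ++ [nxt]) := by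
        simp [kahnStepA, List.foldl_cons, hcond]
      rw [hstep]
      have hfresh : pvIx N nxt ∉ mapN N (res ++ q) := by
        intro hmem
        have := (h5 (pvIx N nxt) hjn).mp hmem
        rw [nodeCnt_cons_self] at this
        omega
      have hMeq : mapN N (res ++ (q ++ [nxt])) = mapN N (res ++ q) ++ [pvIx N nxt] := by
        simp [mapN]
      refine ih (fun x hxm => hsuf x (by simp [hxm])) _ _ _
        ⟨h1', ?_, ?_, ?_, ?_, ?_⟩
      · rw [hMeq, List.nodup_append]
        refine ⟨h2, by simp, ?_⟩
        intro a ha b hbm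
        rw [List.mem_singleton] at hbm; subst hbm
        exact fun he => hfresh (he ▸ ha)
      · intro x hxm
        rcases List.mem_append.mp hxm with hm | hm
        · exact h3 x (by simp [hm])
        · rcases List.mem_append.mp hm with hm2 | hm2
          · exact h3 x (by simp [hm2])
          · rw [List.mem_singleton] at hm2; subst hm2; exact hx
      · intro j hj
        by_cases he : j = pvIx N nxt
        · rw [he, hget]
        · rw [hgv j hj he]
      · intro j hj
        rw [hMeq]
        by_cases he : j = pvIx N nxt
        · rw [he]
          constructor
          · intro _; exact hz
          · intro _; simp
        · have hiff := h5 j hj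
          rw [nodeCnt_cons_ne nxt suf j (fun hh => he hh.symm)] at hiff
          rw [List.mem_append, List.mem_singleton]
          constructor
          · rintro (hm | hm)
            · exact hiff.mp hm
            · exact absurd hm he
          · intro hc
            exact Or.inl (hiff.mpr hc)
      · intro S hS j hSj
        rw [hMeq, List.mem_append, List.mem_singleton]
        rintro (hm | hm)
        · exact h6 S hS j hSj hm
        · have hz' : cntOut N og (mapN N res) j + nodeCnt N suf j = 0 := by
            rw [hm]; exact hz
          obtain ⟨hjlt, u, hSu, x, hxr, hxj⟩ := hS j hSj
          have hu := hS u hSu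
          have hunot : u ∉ mapN N res := fun hm2 =>
            h6 S hS u hSu (by rw [mapN_append, List.mem_append]; exact Or.inl hm2)
          exact (cntOut_zero_iff og (mapN N res) j).mp (by omega) u hu.1 hunot x hxr hxj
    · -- indegree still positive: only the counter changes
      have hcond : ¬ pvGetI (pvSetI ind nxt (pvGetI ind nxt - 1)) nxt = 0 := by
        rw [hcond_eq]
        intro hc
        rw [Int.natCast_eq_zero] at hc
        exact hz hc
      have hstep : kahnStepA (nxt :: suf) (ind, q) =
          kahnStepA suf (pvSetI ind nxt (pvGetI ind nxt - 1), q) := by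
        simp [kahnStepA, List.foldl_cons, hcond]
      rw [hstep]
      refine ih (fun x hxm => hsuf x (by simp [hxm])) _ _ _
        ⟨h1', h2, h3, ?_, ?_, h6⟩
      · intro j hj
        by_cases he : j = pvIx N nxt
        · rw [he, hget]
        · rw [hgv j hj he]
      · intro j hj
        by_cases he : j = pvIx N nxt
        · rw [he]
          have hiff := h5 (pvIx N nxt) hjn
          rw [nodeCnt_cons_self] at hiff
          constructor
          · intro hm; have := hiff.mp hm; omega
          · intro hc; exact absurd hc hz
        · have hiff := h5 j hj
          rw [nodeCnt_cons_ne nxt suf j (fun hh => he hh.symm)] at hiff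
          exact hiff

theorem nodupLt_length_le {N : Nat} (l : List Nat) (hnd : l.Nodup)
    (hmem : ∀ x ∈ l, x < N) : l.length ≤ N := by
  have hsub : l.toFinset ⊆ Finset.range N := by
    intro a ha
    rw [List.mem_toFinset] at ha
    exact Finset.mem_range.mpr (hmem a ha)
  have := Finset.card_le_card hsub
  rwa [List.toFinset_card_of_nodup hnd, Finset.card_range] at this

theorem kahnLoopA_final {N : Nat} (og : List (List Int)) (hogl : og.length = N)
    (hwf : RowsLbl N og) :
    ∀ fuel ind q res, KMid N og [] ind q res → N + 1 - res.length ≤ fuel →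
      ((mapN N (kahnLoopA og fuel ind q res)).Nodup ∧
       (kahnLoopA og fuel ind q res).length = (mapN N (kahnLoopA og fuel ind q res)).length ∧
       (∀ x ∈ kahnLoopA og fuel ind q res, isLbl N x) ∧
       (∀ j, j < N → (j ∈ mapN N (kahnLoopA og fuel ind q res) ↔
         cntOut N og (mapN N (kahnLoopA og fuel ind q res)) j = 0)) ∧
       (∀ S, StuckP N og S → ∀ j, S j → j ∉ mapN N (kahnLoopA og fuel ind q res))) := by
  intro fuel
  induction fuel with
  | zero =>
    intro ind q res h hf
    exfalso
    have hnd : (mapN N res).Nodup := by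
      have := h.2.1
      rw [mapN_append] at this
      exact (List.nodup_append.mp this).1
    have hle := nodupLt_length_le (mapN N res) hnd (fun x hx => by
      rw [mapN, List.mem_map] at hx
      obtain ⟨y, hy, hxy⟩ := hx
      rw [← hxy]
      exact pvIx_lt (h.2.2.1 y (by simp [hy])))
    rw [mapN, List.length_map] at hle
    omega
  | succ fuel ih =>
    intro ind q res h hf
    obtain ⟨h1, h2, h3, h4, h5, h6⟩ := h
    cases q with
    | nil =>
      rw [kahnLoopA]
      rw [List.append_nil] at h2 h5 h6
      refine ⟨h2, by rw [mapN, List.length_map], fun x hx => h3 x (by simp [hx]),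
        fun j hj => ?_, fun S hS j hSj => h6 S hS j hSj⟩
      have := h5 j hj
      simpa [nodeCnt] using this
    | cons now rest =>
      rw [kahnLoopA]
      have hnow : isLbl N now := h3 now (by simp)
      have hjn : pvIx N now < N := pvIx_lt hnow
      have hMeq : mapN N ((res ++ [now]) ++ rest) = mapN N (res ++ now :: rest) := by
        simp [mapN]
      have hfresh : pvIx N now ∉ mapN N res := by
        have hnd := h2
        rw [show mapN N (res ++ now :: rest) =
          mapN N res ++ (pvIx N now :: mapN N rest) from by simp [mapN]] at hnd
        have hd := (List.nodup_append.mp hnd).2.2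
        exact fun hm => hd _ hm (pvIx N now) (by simp) rfl
      have hrow : pvGetLL og now = og.getD (pvIx N now) [] := pvGetLL_eq og hogl now
      have hrowlbl : ∀ x ∈ pvGetLL og now, isLbl N x := by
        intro x hx
        rw [hrow] at hx
        by_cases hlt : pvIx N now < og.length
        · exact hwf _ (by rw [List.getD_eq_getElem _ _ hlt]; exact List.getElem_mem _) x hx
        · rw [List.getD_eq_default _ _ (by omega)] at hx
          simp at hx
      have hpush : ∀ j, cntOut N og (mapN N res) j =
          cntOut N og (mapN N (res ++ [now])) j + nodeCnt N (pvGetLL og now) j := by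
        intro j
        rw [hrow, show mapN N (res ++ [now]) = mapN N res ++ [pvIx N now] from by simp [mapN]]
        exact cntOut_push og (mapN N res) (pvIx N now) j hjn hfresh
      have hmid : KMid N og (pvGetLL og now) ind rest (res ++ [now]) := by
        refine ⟨h1, by rw [hMeq]; exact h2, ?_, ?_, ?_, ?_⟩
        · intro x hxm
          apply h3
          rcases List.mem_append.mp hxm with hm | hm
          · rcases List.mem_append.mp hm with hm2 | hm2
            · simp [hm2]
            · rw [List.mem_singleton] at hm2; simp [hm2]
          · simp [hm]
        · intro j hj
          rw [h4 j hj, hpush j]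
          simp [nodeCnt]
        · intro j hj
          rw [hMeq, h5 j hj, ← hpush j]
          simp [nodeCnt]
        · intro S hS j hSj
          rw [hMeq]
          exact h6 S hS j hSj
      have hstep := kahnStep_fold og (pvGetLL og now) hrowlbl ind rest (res ++ [now]) hmid
      have hlen2 : (res ++ [now]).length = res.length + 1 := by simp
      exact ih _ _ _ hstep (by omega)

-- ---------- elimination loop: invariant and final characterisation ----------
theorem pvGetB_natCast {N : Nat} (xs : List Bool) (hlen : xs.length = N) (u : Nat) :
    pvGetB xs ((u : Nat) : Int) = xs.getD u false := by
  rw [pvGetB_eq xs hlen, pvIx_natCast]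
theorem pvGetI_natCast {N : Nat} (xs : List Int) (hlen : xs.length = N) (u : Nat) :
    pvGetI xs ((u : Nat) : Int) = xs.getD u 0 := by
  rw [pvGetI_eq xs hlen, pvIx_natCast]
theorem pvGetLL_natCast {N : Nat} (xs : List (List Int)) (hlen : xs.length = N) (u : Nat) :
    pvGetLL xs ((u : Nat) : Int) = xs.getD u [] := by
  rw [pvGetLL_eq xs hlen, pvIx_natCast]

theorem getD_set_nodeB (xs : List Bool) (i j : Nat) (w : Bool) (hj : j < xs.length) :
    (xs.set i w).getD j false = if i = j then w else xs.getD j false := by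
  by_cases h : i = j
  · subst h; rw [getD_set_self _ _ _ _ hj, if_pos rfl]
  · rw [getD_set_ne _ _ _ _ _ h, if_neg h]

-- inner fold of blockedB: set bl[v] := true for every label v in the row
theorem setTrues_len (l : List Int) (bl : List Bool) :
    (l.foldl (fun bl v => pvSetB bl v true) bl).length = bl.length := by
  induction l generalizing bl with
  | nil => rfl
  | cons x t ih => rw [List.foldl_cons, ih]; simp [pvSetB]

theorem setTrues_getD {N : Nat} (l : List Int) :
    ∀ bl : List Bool, bl.length = N → ∀ j : Nat, j < N →
      ((l.foldl (fun bl v => pvSetB bl v true) bl).getD j false = true ↔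
        (bl.getD j false = true ∨ ∃ x ∈ l, pvIx N x = j)) := by
  induction l with
  | nil => intro bl hlen j hj; simp
  | cons x t ih =>
    intro bl hlen j hj
    have hlen2 : (pvSetB bl x true).length = N := by simp [pvSetB, hlen]
    rw [List.foldl_cons, ih (pvSetB bl x true) hlen2 j hj, pvSetB_eq bl hlen,
      getD_set_nodeB bl _ j true (by omega)]
    by_cases he : pvIx N x = j
    · rw [if_pos he]
      constructor
      · rintro (hm | hm)
        · exact Or.inr ⟨x, by simp, he⟩
        · obtain ⟨y, hy, hyj⟩ := hm
          exact Or.inr ⟨y, by simp [hy], hyj⟩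
      · intro _; exact Or.inl rfl
    · rw [if_neg he]
      constructor
      · rintro (hm | hm)
        · exact Or.inl hm
        · obtain ⟨y, hy, hyj⟩ := hm
          exact Or.inr ⟨y, by simp [hy], hyj⟩
      · rintro (hm | ⟨y, hy, hyj⟩)
        · exact Or.inl hm
        · rcases List.mem_cons.mp hy with hm2 | hm2
          · subst hm2; exact absurd hyj he
          · exact Or.inr ⟨y, hm2, hyj⟩

theorem blockedB_spec {N : Nat} (cons : List (List Int)) (alive : List Bool)
    (hcl : cons.length = N) (halen : alive.length = N) :
    (blockedB N cons alive).length = N ∧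
    ∀ j : Nat, j < N → (pvGetB (blockedB N cons alive) ((j : Nat) : Int) = true ↔
      ∃ u : Nat, u < N ∧ alive.getD u false = true ∧ ∃ x ∈ cons.getD u [], pvIx N x = j) := by
  unfold blockedB
  suffices h : ∀ ws : List Nat, (∀ w ∈ ws, w < N) → ∀ bl : List Bool, bl.length = N →
      ((ws.foldl (fun bl w =>
        if pvGetB alive ((w : Nat) : Int) then
          (pvGetLL cons ((w : Nat) : Int)).foldl (fun bl v => pvSetB bl v true) bl
        else bl) bl).length = N ∧
       ∀ j : Nat, j < N → ((ws.foldl (fun bl w =>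
        if pvGetB alive ((w : Nat) : Int) then
          (pvGetLL cons ((w : Nat) : Int)).foldl (fun bl v => pvSetB bl v true) bl
        else bl) bl).getD j false = true ↔
         (bl.getD j false = true ∨
           ∃ u : Nat, u ∈ ws ∧ alive.getD u false = true ∧ ∃ x ∈ cons.getD u [], pvIx N x = j))) by
    obtain ⟨hlen, hiff⟩ := h (List.range N) (fun w hw => List.mem_range.mp hw)
      (List.replicate N false) (by simp)
    refine ⟨hlen, fun j hj => ?_⟩
    rw [pvGetB_natCast _ hlen, hiff j hj]
    constructor
    · rintro (hm | ⟨u, hu, hal, hrow⟩)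
      · rw [List.getD_replicate _ hj] at hm
        exact absurd hm (by simp)
      · exact ⟨u, List.mem_range.mp hu, hal, hrow⟩
    · rintro ⟨u, hu, hal, hrow⟩
      exact Or.inr ⟨u, List.mem_range.mpr hu, hal, hrow⟩
  intro ws
  induction ws with
  | nil => intro _ bl hlen; exact ⟨hlen, fun j hj => by simp⟩
  | cons w t ih =>
    intro hws bl hlen
    have hwlt : w < N := hws w (by simp)
    by_cases ha : pvGetB alive ((w : Nat) : Int) = true
    · have hlen2 : ((pvGetLL cons ((w : Nat) : Int)).foldl (fun bl v => pvSetB bl v true) bl).length = N := by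
        rw [setTrues_len, hlen]
      obtain ⟨ihl, ihg⟩ := ih (fun y hy => hws y (by simp [hy])) _ hlen2
      refine ⟨by rw [List.foldl_cons, if_pos ha]; exact ihl, fun j hj => ?_⟩
      rw [List.foldl_cons, if_pos ha, ihg j hj, setTrues_getD _ bl hlen j hj]
      rw [pvGetB_natCast alive halen] at ha
      rw [pvGetLL_natCast cons hcl]
      constructor
      · rintro ((hm | hm) | ⟨u, hu, h1, h2⟩)
        · exact Or.inl hm
        · exact Or.inr ⟨w, by simp, ha, hm⟩
        · exact Or.inr ⟨u, by simp [hu], h1, h2⟩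
      · rintro (hm | ⟨u, hu, h1, h2⟩)
        · exact Or.inl (Or.inl hm)
        · rcases List.mem_cons.mp hu with hm2 | hu2
          · subst hm2; exact Or.inl (Or.inr h2)
          · exact Or.inr ⟨u, hu2, h1, h2⟩
    · obtain ⟨ihl, ihg⟩ := ih (fun y hy => hws y (by simp [hy])) bl hlen
      refine ⟨by rw [List.foldl_cons, if_neg ha]; exact ihl, fun j hj => ?_⟩
      rw [List.foldl_cons, if_neg ha, ihg j hj]
      rw [pvGetB_natCast alive halen] at ha
      constructor
      · rintro (hm | ⟨u, hu, h1, h2⟩)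
        · exact Or.inl hm
        · exact Or.inr ⟨u, by simp [hu], h1, h2⟩
      · rintro (hm | ⟨u, hu, h1, h2⟩)
        · exact Or.inl hm
        · rcases List.mem_cons.mp hu with hm2 | hu2
          · subst hm2; exact absurd h1 ha
          · exact Or.inr ⟨u, hu2, h1, h2⟩

theorem kill_len (rm : List Nat) (alive : List Bool) :
    (rm.foldl (fun al u => pvSetB al ((u : Nat) : Int) false) alive).length = alive.length := by
  induction rm generalizing alive with
  | nil => rfl
  | cons x t ih => rw [List.foldl_cons, ih]; simp [pvSetB]

theorem kill_getD {N : Nat} (rm : List Nat) :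
    ∀ alive : List Bool, alive.length = N → ∀ j : Nat, j < N →
      ((rm.foldl (fun al u => pvSetB al ((u : Nat) : Int) false) alive).getD j false = true ↔
        (alive.getD j false = true ∧ j ∉ rm)) := by
  induction rm with
  | nil => intro alive hlen j hj; simp
  | cons x t ih =>
    intro alive hlen j hj
    have hlen2 : (pvSetB alive ((x : Nat) : Int) false).length = N := by simp [pvSetB, hlen]
    rw [List.foldl_cons, ih _ hlen2 j hj, pvSetB_eq alive hlen, pvIx_natCast,
      getD_set_nodeB alive x j false (by omega)]
    by_cases he : x = j
    · rw [if_pos he]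
      constructor
      · rintro ⟨hc, _⟩; exact absurd hc (by simp)
      · rintro ⟨_, hc⟩; exact absurd (by simp [he] : j ∈ x :: t) hc
    · rw [if_neg he]
      constructor
      · rintro ⟨hc1, hc2⟩
        refine ⟨hc1, fun hm => ?_⟩
        rcases List.mem_cons.mp hm with hm2 | hm2
        · exact he hm2.symm
        · exact hc2 hm2
      · rintro ⟨hc1, hc2⟩
        exact ⟨hc1, fun hm => hc2 (by simp [hm])⟩

def aliveCard (N : Nat) (alive : List Bool) : Nat :=
  ((Finset.range N).filter (fun i => alive.getD i false = true)).card

theorem anyTrue_iff {N : Nat} (alive : List Bool) (hlen : alive.length = N) :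
    (alive.any (fun b => b) = true ↔ ∃ i : Nat, i < N ∧ alive.getD i false = true) := by
  rw [List.any_eq_true]
  constructor
  · rintro ⟨x, hx, hpx⟩
    obtain ⟨i, hi, hgi⟩ := List.mem_iff_getElem.mp hx
    refine ⟨i, by omega, ?_⟩
    rw [List.getD_eq_getElem _ _ hi, hgi]
    exact hpx
  · rintro ⟨i, hi, hgi⟩
    rw [List.getD_eq_getElem _ _ (by omega)] at hgi
    exact ⟨alive[i], List.getElem_mem _, hgi⟩

theorem elimLoopB_spec {N : Nat} (cons : List (List Int)) (hcl : cons.length = N) :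
    ∀ fuel alive, alive.length = N →
      (∀ S, StuckP N cons S → ∀ j, S j → alive.getD j false = true) →
      aliveCard N alive + 1 ≤ fuel →
      (elimLoopB N cons fuel alive = true ↔ (∀ S, StuckP N cons S → ∀ j, ¬ S j)) := by
  intro fuel
  induction fuel with
  | zero => intro alive _ _ hf; omega
  | succ fuel ih =>
    intro alive hlen hstk hf
    obtain ⟨hbl, hbiff⟩ := blockedB_spec cons alive hcl hlen
    by_cases hrm : (List.range N).filter
        (fun u => pvGetB alive ((u : Nat) : Int) && !(pvGetB (blockedB N cons alive) ((u : Nat) : Int))) = []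
    case pos =>
      rw [show elimLoopB N cons (fuel + 1) alive = !(alive.any (fun b => b)) from by
        simp only [elimLoopB]
        rw [if_pos hrm]]
      by_cases hany : alive.any (fun b => b) = true
      · -- somebody is still alive: the alive set is stuck, so both sides are false
        obtain ⟨i0, hi0, hg0⟩ := (anyTrue_iff alive hlen).mp hany
        rw [hany]
        apply iff_of_false (by simp)
        intro hall
        have hstuck : StuckP N cons (fun j => j < N ∧ alive.getD j false = true) := by
          rintro j ⟨hj, haj⟩
          refine ⟨hj, ?_⟩
          have hnotrm : ¬ (pvGetB alive ((j : Nat) : Int) &&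
              !(pvGetB (blockedB N cons alive) ((j : Nat) : Int))) = true := by
            intro hc
            have hmem : j ∈ (List.range N).filter
                (fun u => pvGetB alive ((u : Nat) : Int) &&
                  !(pvGetB (blockedB N cons alive) ((u : Nat) : Int))) :=
              List.mem_filter.mpr ⟨List.mem_range.mpr hj, hc⟩
            rw [hrm] at hmem
            exact absurd hmem (List.not_mem_nil)
          have hblj : pvGetB (blockedB N cons alive) ((j : Nat) : Int) = true := by
            by_contra hb
            rw [Bool.not_eq_true] at hb
            rw [pvGetB_natCast alive hlen] at hnotrm
            exact hnotrm (by rw [haj, hb]; rfl)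
          obtain ⟨u, hu, hau, x, hxr, hxj⟩ := (hbiff j hj).mp hblj
          exact ⟨u, ⟨hu, hau⟩, x, hxr, hxj⟩
        exact hall _ hstuck i0 ⟨hi0, hg0⟩
      · -- nobody is alive: no stuck set can be nonempty either
        rw [Bool.not_eq_true] at hany
        rw [hany]
        apply iff_of_true (by simp)
        intro S hS j hSj
        have hj := (hS j hSj).1
        exact absurd ((anyTrue_iff alive hlen).mpr ⟨j, hj, hstk S hS j hSj⟩)
          (by rw [hany]; simp)
    case neg =>
      rw [show elimLoopB N cons (fuel + 1) alive = elimLoopB N cons fuel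
          (((List.range N).filter (fun u => pvGetB alive ((u : Nat) : Int) &&
            !(pvGetB (blockedB N cons alive) ((u : Nat) : Int)))).foldl
            (fun al u => pvSetB al ((u : Nat) : Int) false) alive) from by
        simp only [elimLoopB]
        rw [if_neg hrm]]
      set rm := (List.range N).filter (fun u => pvGetB alive ((u : Nat) : Int) &&
        !(pvGetB (blockedB N cons alive) ((u : Nat) : Int))) with hrmdef
      set alive' := rm.foldl (fun al u => pvSetB al ((u : Nat) : Int) false) alive with halive'
      have hlen' : alive'.length = N := by rw [halive', kill_len, hlen]
      have hkill := kill_getD rm alive hlen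
      -- stuck sets stay alive
      have hstk' : ∀ S, StuckP N cons S → ∀ j, S j → alive'.getD j false = true := by
        intro S hS j hSj
        have hj := (hS j hSj).1
        rw [halive', hkill j hj]
        refine ⟨hstk S hS j hSj, ?_⟩
        intro hmem
        have hfl := (List.mem_filter.mp hmem).2
        obtain ⟨hjlt, u, hSu, x, hxr, hxj⟩ := hS j hSj
        have hu := (hS u hSu).1
        have hblj : pvGetB (blockedB N cons alive) ((j : Nat) : Int) = true :=
          (hbiff j hj).mpr ⟨u, hu, hstk S hS u hSu, x, hxr, hxj⟩
        rw [hblj] at hfl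
        simp at hfl
      -- the alive count strictly decreases
      have hcard : aliveCard N alive' < aliveCard N alive := by
        obtain ⟨u0, hu0⟩ := List.exists_mem_of_ne_nil rm hrm
        have hu0f := List.mem_filter.mp hu0
        have hu0lt : u0 < N := List.mem_range.mp hu0f.1
        apply Finset.card_lt_card
        constructor
        · intro i hi
          have hi2 := Finset.mem_filter.mp hi
          have hilt := Finset.mem_range.mp hi2.1
          refine Finset.mem_filter.mpr ⟨hi2.1, ?_⟩
          exact ((hkill i hilt).mp hi2.2).1
        · intro hsub
          have hmem : u0 ∈ (Finset.range N).filter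
              (fun i => alive.getD i false = true) :=
            Finset.mem_filter.mpr ⟨Finset.mem_range.mpr hu0lt, by
              have hthis := hu0f.2
              by_contra hb
              rw [Bool.not_eq_true] at hb
              rw [pvGetB_natCast alive hlen, hb] at hthis
              simp at hthis⟩
          have h2m := Finset.mem_filter.mp (hsub hmem)
          exact ((hkill u0 hu0lt).mp h2m.2).2 hu0
      exact ih alive' hlen' hstk' (by omega)

-- ---------- counting helpers for the final verdict ----------
theorem all_nodes_length_ge {N : Nat} (l : List Nat) (hnd : l.Nodup)
    (hall : ∀ j, j < N → j ∈ l) : N ≤ l.length := by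
  have hsub : Finset.range N ⊆ l.toFinset := by
    intro a ha
    rw [List.mem_toFinset]
    exact hall a (Finset.mem_range.mp ha)
  have := Finset.card_le_card hsub
  rwa [List.toFinset_card_of_nodup hnd, Finset.card_range] at this

theorem missing_length_lt {N : Nat} (l : List Nat) (j : Nat) (hnd : l.Nodup)
    (hmem : ∀ x ∈ l, x < N) (hj : j < N) (hjm : j ∉ l) : l.length < N := by
  have hsub : l.toFinset ⊆ (Finset.range N).erase j := by
    intro a ha
    rw [List.mem_toFinset] at ha
    rw [Finset.mem_erase, Finset.mem_range]
    exact ⟨fun he => hjm (he ▸ ha), hmem a ha⟩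
  have hcard := Finset.card_le_card hsub
  rw [List.toFinset_card_of_nodup hnd,
    Finset.card_erase_of_mem (Finset.mem_range.mpr hj), Finset.card_range] at hcard
  omega

-- q0: the initial zero-indegree queue of A
theorem q0_fold_spec (ind : List Int) (l : List Nat) (acc : List Int) :
    l.foldl (fun q i => if pvGetI ind ((i : Nat) : Int) = 0 then q ++ [((i : Nat) : Int)] else q) acc =
      acc ++ (l.filter (fun i => decide (pvGetI ind ((i : Nat) : Int) = 0))).map
        (fun i => ((i : Nat) : Int)) := by
  induction l generalizing acc with
  | nil => simp
  | cons x t ih =>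
    rw [List.foldl_cons]
    by_cases h : pvGetI ind ((x : Nat) : Int) = 0
    · rw [if_pos h, ih, List.filter_cons_of_pos (by simpa using h)]
      simp
    · rw [if_neg h, ih, List.filter_cons_of_neg (by simpa using h)]

theorem aliveCard_replicate (N : Nat) : aliveCard N (List.replicate N true) = N := by
  unfold aliveCard
  rw [Finset.filter_true_of_mem, Finset.card_range]
  intro i hi
  rw [List.getD_replicate _ (Finset.mem_range.mp hi)]

-- ===== VERDICT =====
theorem solution_spec : Claim_equal_solution := by
  intro n path order hdom hpre
  unfold Spec_solution
  obtain ⟨hn1, hrp, hro⟩ := hpre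
  have hN1 : 1 ≤ n.toNat := by omega
  have hnN : ((n.toNat : Nat) : Int) = n := by omega
  have hr_path : ∀ p ∈ path, isLbl n.toNat p.1 ∧ isLbl n.toNat p.2 := by
    intro p hp
    obtain ⟨a, b, c, d⟩ := hrp p hp
    exact ⟨⟨by omega, by omega⟩, ⟨by omega, by omega⟩⟩
  have hr_order : ∀ p ∈ order, isLbl n.toNat p.1 ∧ isLbl n.toNat p.2 := by
    intro p hp
    obtain ⟨a, b, c, d⟩ := hro p hp
    exact ⟨⟨by omega, by omega⟩, ⟨by omega, by omega⟩⟩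
  have hgrows : RowsLbl n.toNat (buildGraphA path (List.replicate n.toNat [])) :=
    buildGraph_rows path _ (by simp) hr_path (by
      intro l hl x hx
      rw [List.eq_of_mem_replicate hl] at hx
      simp at hx)
  obtain ⟨hbinv0, hrows0⟩ := buildOrder_BInv (N := n.toNat) order
    (List.replicate n.toNat []) (List.replicate n.toNat 0) hr_order (BInv_init n.toNat)
    (by
      intro l hl x hx
      rw [List.eq_of_mem_replicate hl] at hx
      simp at hx)
  -- rewrite both programs to the shared BFS result
  simp only [solution, solution_alt]
  rw [buildOrderA_eta]
  rw [bfsLoop_proj (buildGraphA path (List.replicate n.toNat [])) (n.toNat + 1)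
    (pvSetB (List.replicate n.toNat false) 0 true) [0]
    (buildConsB order (List.replicate n.toNat [])) (buildIND order (List.replicate n.toNat 0))]
  have hsinv : SInv n.toNat [0] (buildConsB order (List.replicate n.toNat []))
      (buildIND order (List.replicate n.toNat 0)) := by
    refine ⟨hbinv0, ?_, hrows0⟩
    intro x hxm
    rw [List.mem_singleton] at hxm; subst hxm
    exact ⟨by omega, by omega⟩
  obtain ⟨⟨hogl, hindl, hindv⟩, hwfog⟩ := bfsLoopA_inv
    (buildGraphA path (List.replicate n.toNat [])) hgrows (n.toNat + 1)
    (pvSetB (List.replicate n.toNat false) 0 true) [0]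
    (buildConsB order (List.replicate n.toNat [])) (buildIND order (List.replicate n.toNat 0)) hsinv
  set r := bfsLoopA (buildGraphA path (List.replicate n.toNat [])) (n.toNat + 1)
    (pvSetB (List.replicate n.toNat false) 0 true) [0]
    (buildConsB order (List.replicate n.toNat [])) (buildIND order (List.replicate n.toNat 0)) with hr
  -- the initial Kahn queue
  rw [q0_fold_spec r.2.2 (List.range n.toNat) [], List.nil_append]
  set q0 := (((List.range n.toNat).filter
    (fun i => decide (pvGetI r.2.2 ((i : Nat) : Int) = 0))).map (fun i => ((i : Nat) : Int))) with hq0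
  have hmapq0 : mapN n.toNat q0 = (List.range n.toNat).filter
      (fun i => decide (pvGetI r.2.2 ((i : Nat) : Int) = 0)) := by
    rw [hq0, mapN, List.map_map]
    have hcomp : ((fun x => pvIx n.toNat x) ∘ fun i : Nat => ((i : Nat) : Int)) = id :=
      funext fun i => pvIx_natCast n.toNat i
    rw [hcomp, List.map_id]
  have hq0lbl : ∀ x ∈ q0, isLbl n.toNat x := by
    intro x hx
    rw [hq0, List.mem_map] at hx
    obtain ⟨i, hif, hiv⟩ := hx
    have := List.mem_range.mp (List.mem_filter.mp hif).1
    rw [← hiv]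
    exact isLbl_natCast this
  have hq0memN : ∀ j : Nat, j < n.toNat → (j ∈ mapN n.toNat q0 ↔ r.2.2.getD j 0 = 0) := by
    intro j hj
    rw [hmapq0, List.mem_filter, List.mem_range]
    constructor
    · intro ⟨_, hd⟩
      have := of_decide_eq_true hd
      rwa [pvGetI_natCast r.2.2 hindl] at this
    · intro hd
      refine ⟨hj, decide_eq_true ?_⟩
      rwa [pvGetI_natCast r.2.2 hindl]
  have hkmid : KMid n.toNat r.2.1 [] r.2.2 q0 [] := by
    refine ⟨hindl, ?_, ?_, ?_, ?_, ?_⟩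
    · rw [List.nil_append, hmapq0]
      exact List.nodup_range.filter _
    · intro x hxm
      rw [List.nil_append] at hxm
      exact hq0lbl x hxm
    · intro j hj
      rw [hindv j hj]
      simp [nodeCnt, mapN]
    · intro j hj
      rw [List.nil_append, hq0memN j hj, hindv j hj]
      simp [nodeCnt, mapN]
    · intro S hS j hSj
      rw [List.nil_append, hq0memN j (hS j hSj).1, hindv j (hS j hSj).1]
      intro hc
      obtain ⟨hjlt, u, hSu, x, hxr, hxj⟩ := hS j hSj
      refine (cntOut_zero_iff r.2.1 [] j).mp ?_ u (hS u hSu).1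
        (List.not_mem_nil) x hxr hxj
      exact_mod_cast hc
  obtain ⟨hresnd, hreslen, hreslbl, hresiff, hresstk⟩ := kahnLoopA_final r.2.1 hogl hwfog
    (n.toNat + 1) r.2.2 q0 [] hkmid (by simp)
  set res := kahnLoopA r.2.1 (n.toNat + 1) r.2.2 q0 [] with hres
  have hmlen : (mapN n.toNat res).length = res.length := by rw [mapN, List.length_map]
  -- the elimination loop decides exactly "no nonempty stuck set"
  have hElim := elimLoopB_spec r.2.1 hogl (n.toNat + 1) (List.replicate n.toNat true)
    (by simp)
    (fun S hS j hSj => by rw [List.getD_replicate _ (hS j hSj).1])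
    (by rw [aliveCard_replicate])
  by_cases hns : ∀ S, StuckP n.toNat r.2.1 S → ∀ j, ¬ S j
  · -- no stuck set: Kahn reaches everything, elimination kills everything
    have hall : ∀ j : Nat, j < n.toNat → j ∈ mapN n.toNat res := by
      intro j hj
      by_contra hjm
      have hstuck : StuckP n.toNat r.2.1 (fun k => k < n.toNat ∧ k ∉ mapN n.toNat res) := by
        rintro k ⟨hk, hkm⟩
        refine ⟨hk, ?_⟩
        have hcnt : cntOut n.toNat r.2.1 (mapN n.toNat res) k ≠ 0 :=
          fun hc => hkm ((hresiff k hk).mpr hc)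
        have hnall : ¬ ∀ u : Nat, u < n.toNat → u ∉ mapN n.toNat res →
            ∀ x ∈ r.2.1.getD u [], pvIx n.toNat x ≠ k :=
          fun hallu => hcnt ((cntOut_zero_iff r.2.1 (mapN n.toNat res) k).mpr hallu)
        push Not at hnall
        obtain ⟨u, hu1, hu2, x, hxr, hxj⟩ := hnall
        exact ⟨u, ⟨hu1, hu2⟩, x, hxr, hxj⟩
      exact (hns _ hstuck j) ⟨hj, hjm⟩
    have hge := all_nodes_length_ge (mapN n.toNat res) hresnd hall
    rw [hElim.mpr hns, if_neg (by omega)]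
  · have hBfalse : elimLoopB n.toNat r.2.1 (n.toNat + 1) (List.replicate n.toNat true) = false := by
      by_contra hb
      rw [Bool.not_eq_false] at hb
      exact hns (hElim.mp hb)
    push Not at hns
    obtain ⟨S, hS, j, hSj⟩ := hns
    have hjm := hresstk S hS j hSj
    have hjlt := (hS j hSj).1
    have hlt := missing_length_lt (mapN n.toNat res) j hresnd
      (fun x hx => by
        rw [mapN, List.mem_map] at hx
        obtain ⟨y, hy, hxy⟩ := hx
        rw [← hxy]
        exact pvIx_lt (hreslbl y hy)) hjlt hjm
    rw [hBfalse, if_pos (by omega)]
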